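-- pv_equiv track=rewrite | github.com/limenda/intro-to-probability | ch01_exercises.py | five_in_a_row
-- ===== SOURCE A (Python) =====
-- from typing import List
--
-- def five_in_a_row(shots: List[bool]) -> bool:
--     ''' The function takes the shots history and reports back if there was a streak of five.'''
--     five_hits = 0
--     for shot in shots:
--         if shot:
--             five_hits += 1
--             if five_hits >= 5:
--                 return True
--         else:
--             five_hits = 0
--
--     return False
-- ===== SOURCE B (Python) =====
-- from itertools import groupby
-- from typing import List
--
-- def five_in_a_row(shots: List[bool]) -> bool:
--     '''Report whether the shots history contains a streak of five hits.'''
--     return any(key and sum(1 for _ in grp) >= 5 for key, grp in groupby(shots))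
-- ===== Notes on version B (the rewrite author's own statement) =====
-- stated objective: idiomatic
-- what changed: Replaced the manual reset-on-miss counter loop with itertools.groupby: split the shots into maximal constant runs and ask whether any truthy run has length >= 5.
import Mathlib
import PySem

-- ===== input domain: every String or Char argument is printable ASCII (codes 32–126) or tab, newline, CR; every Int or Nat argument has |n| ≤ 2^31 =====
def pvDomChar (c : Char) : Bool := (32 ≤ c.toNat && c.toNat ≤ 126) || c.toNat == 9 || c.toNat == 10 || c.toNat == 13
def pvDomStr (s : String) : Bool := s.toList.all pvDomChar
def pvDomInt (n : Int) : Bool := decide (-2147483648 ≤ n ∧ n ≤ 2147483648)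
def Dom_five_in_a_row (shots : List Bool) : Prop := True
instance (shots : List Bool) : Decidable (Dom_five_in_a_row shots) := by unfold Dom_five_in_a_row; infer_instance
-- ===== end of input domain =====

-- B replaces A's reset-on-miss running counter with a groupby decomposition into
-- maximal constant runs; idiomatic, same O(n) cost. Equivalence is exact (no Pre_).

-- ===== PORT A =====
-- A's for-loop with the mutable counter `five_hits` and early `return True`,
-- as structural recursion over the remaining shots carrying the counter.
def five_in_a_row_go (shots : List Bool) (five_hits : Int) : Bool :=
  match shots with
  | [] => false
  | shot :: rest =>
    if shot then
      if five_hits + 1 ≥ 5 then true else five_in_a_row_go rest (five_hits + 1)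
    else
      five_in_a_row_go rest 0

def five_in_a_row (shots : List Bool) : Bool :=
  five_in_a_row_go shots 0

-- ===== PORT B =====
-- itertools.groupby: maximal runs of equal elements, each as (key, run length).
def pyGroupBy (shots : List Bool) : List (Bool × Int) :=
  match shots with
  | [] => []
  | x :: xs =>
    (x, (xs.takeWhile (· == x)).length + 1) :: pyGroupBy (xs.dropWhile (· == x))
termination_by shots.length
decreasing_by
  simp only [List.length_cons]
  exact Nat.lt_succ_of_le (List.length_dropWhile_le _ _)

def five_in_a_row_alt (shots : List Bool) : Bool :=
  (pyGroupBy shots).any (fun g => g.1 && decide (g.2 ≥ 5))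

-- ===== PRECONDITION & SPEC =====
def Spec_five_in_a_row (shots : List Bool) (out : Bool) : Prop := out = five_in_a_row_alt shots
instance (shots : List Bool) (out : Bool) : Decidable (Spec_five_in_a_row shots out) := by unfold Spec_five_in_a_row; infer_instance

-- ===== CLAIM (what is proved, stated in full; the proofs are below) =====
def Claim_equal_five_in_a_row : Prop := ∀ (shots : List Bool), Dom_five_in_a_row shots → Spec_five_in_a_row shots (five_in_a_row shots)

-- ===== LEMMAS AND PROOFS =====

-- Dropping leading misses does not change A's loop started at counter 0.
theorem go_dropFalse (xs : List Bool) :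
    five_in_a_row_go xs 0 = five_in_a_row_go (xs.dropWhile (· == false)) 0 := by
  induction xs with
  | nil => rfl
  | cons x xs ih =>
    cases x with
    | false => simpa [five_in_a_row_go, List.dropWhile] using ih
    | true => simp [List.dropWhile]

-- A's loop over a run of k hits followed by `rest` (empty or starting with a miss),
-- from a counter 0 ≤ c < 5: returns true iff c + k reaches 5, else restarts at 0 on rest.
theorem go_run (k : Nat) (c : Int) (rest : List Bool)
    (hc0 : 0 ≤ c) (hc5 : c < 5) (hrest : rest = [] ∨ rest.head? = some false) :
    five_in_a_row_go (List.replicate k true ++ rest) c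
      = (decide (c + k ≥ 5) || five_in_a_row_go rest 0) := by
  induction k generalizing c with
  | zero =>
    have hdec : decide (c + (0 : Nat) ≥ 5) = false := by
      simp; omega
    rw [hdec]
    rcases hrest with h | h
    · subst h; rfl
    · cases rest with
      | nil => simp at h
      | cons r rs =>
        simp at h; subst h
        simp [five_in_a_row_go]
  | succ k ih =>
    by_cases h5 : c + 1 ≥ 5
    · have : decide (c + (k + 1 : Nat) ≥ 5) = true := by simp; omega
      rw [this]
      simp [List.replicate_succ, five_in_a_row_go, h5]
    · have heq : decide (c + (k + 1 : Nat) ≥ 5) = decide (c + 1 + (k : Nat) ≥ 5) := by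
        simp only [decide_eq_decide]; omega
      rw [heq, ← ih (c + 1) (by omega) (by omega)]
      simp [List.replicate_succ, five_in_a_row_go, h5]

-- takeWhile of a boolean equality is a replicate of its length.
theorem takeWhile_eq_replicate (x : Bool) (xs : List Bool) :
    xs.takeWhile (· == x) = List.replicate (xs.takeWhile (· == x)).length x := by
  induction xs with
  | nil => rfl
  | cons y ys ih =>
    by_cases h : y = x
    · subst h; simpa [List.takeWhile, List.replicate_succ] using ih
    · have : (y == x) = false := by simp [h]
      simp [List.takeWhile, this]

-- head of dropWhile (· == true) is not true
theorem dropWhile_head (xs : List Bool) :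
    xs.dropWhile (· == true) = [] ∨ (xs.dropWhile (· == true)).head? = some false := by
  induction xs with
  | nil => exact Or.inl rfl
  | cons y ys ih =>
    cases y with
    | true => simpa [List.dropWhile] using ih
    | false => right; simp [List.dropWhile]

theorem main_eq_aux (n : Nat) : ∀ s : List Bool, s.length < n →
    five_in_a_row_go s 0 = five_in_a_row_alt s := by
  induction n with
  | zero => intro s hs; omega
  | succ n ih =>
    intro s hs
    match s with
    | [] => simp [five_in_a_row_go, five_in_a_row_alt, pyGroupBy]
    | false :: xs =>
      rw [show five_in_a_row_go (false :: xs) 0 = five_in_a_row_go xs 0 from rfl,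
          go_dropFalse]
      have hlen : (xs.dropWhile (· == false)).length < n := by
        have := List.length_dropWhile_le (· == false) xs
        simp at hs; omega
      rw [ih _ hlen]
      simp [five_in_a_row_alt, pyGroupBy]
    | true :: xs =>
      have hsplit : true :: xs
          = List.replicate ((xs.takeWhile (· == true)).length + 1) true
              ++ xs.dropWhile (· == true) := by
        rw [List.replicate_succ]
        simp only [List.cons_append, List.cons.injEq, true_and]
        conv_lhs => rw [← List.takeWhile_append_dropWhile (p := (· == true)) (l := xs)]
        rw [← takeWhile_eq_replicate]
      have hlen : (xs.dropWhile (· == true)).length < n := by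
        have := List.length_dropWhile_le (· == true) xs
        simp at hs; omega
      conv_lhs => rw [hsplit]
      rw [go_run _ 0 _ le_rfl (by omega) (dropWhile_head xs), ih _ hlen]
      simp only [five_in_a_row_alt]
      rw [pyGroupBy]
      simp only [List.any_cons, Bool.true_and]
      congr 1
      simp only [decide_eq_decide]
      push_cast
      omega

-- ===== VERDICT (by name: the statement is the Claim_ definition above) =====
theorem five_in_a_row_spec : Claim_equal_five_in_a_row := by
  intro shots _
  unfold Spec_five_in_a_row five_in_a_row
  exact main_eq_aux (shots.length + 1) shots (Nat.lt_succ_self _)
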